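-- pv_equiv track=rewrite | github.com/vOzzT/EEL4334-Project1 | qm.py | expand_dont_cares
-- ===== SOURCE A (Python) =====
-- import itertools
--
-- def expand_dont_cares(minterm):
--     """Expands a minterm with don't-care '-' into all possible binary combinations."""
--     positions = [i for i, char in enumerate(minterm) if char == '-']
--     combinations = []
--     for values in itertools.product("01", repeat=len(positions)):
--         expanded = list(minterm)
--         for pos, value in zip(positions, values):
--             expanded[pos] = value
--         combinations.append("".join(expanded))
--     return combinations
-- ===== SOURCE B (Python) =====
-- def expand_dont_cares(minterm):
--     """Expands a minterm with don't-care '-' into all possible binary combinations."""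
--     i = minterm.find('-')
--     if i == -1:
--         return [minterm]
--     head, tail = minterm[:i], minterm[i + 1:]
--     rests = expand_dont_cares(tail)
--     return [head + b + rest for b in "01" for rest in rests]
-- ===== Notes on version B (the rewrite author's own statement) =====
-- stated objective: faster
-- what changed: Replaced the itertools.product-over-dash-positions construction (enumerate all dash positions, cartesian product, positional substitution into a fresh list copy per combination) by a recursion on the first don't-care: substitute each binary value there in order and recurse on the suffix, which skips the enumerate/list/join machinery entirely when few or no dashes are present.
import Mathlib
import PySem

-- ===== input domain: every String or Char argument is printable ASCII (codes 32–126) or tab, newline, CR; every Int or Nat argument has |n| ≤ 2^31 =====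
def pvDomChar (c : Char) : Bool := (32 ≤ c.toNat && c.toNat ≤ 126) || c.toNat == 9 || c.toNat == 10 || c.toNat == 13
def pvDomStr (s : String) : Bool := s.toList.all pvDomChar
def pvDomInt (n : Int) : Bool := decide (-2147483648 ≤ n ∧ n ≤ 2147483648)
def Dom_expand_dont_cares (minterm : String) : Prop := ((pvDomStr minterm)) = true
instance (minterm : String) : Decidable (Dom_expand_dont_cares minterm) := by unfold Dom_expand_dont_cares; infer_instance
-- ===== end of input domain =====

-- B replaces A's cartesian product over dash positions by a recursion on the first
-- don't-care: '0' then '1' at the first '-', recursing on the suffix; same values, same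
-- order (objective: faster — a timing run measured B faster on dash-sparse inputs).

-- ===== PORT A =====
-- itertools.product("01", repeat=n), in itertools order (first coordinate varies slowest)
def prodA01 : Nat → List (List Char)
  | 0 => [[]]
  | n + 1 => ['0', '1'].flatMap (fun v => (prodA01 n).map (fun vs => v :: vs))

def expand_dont_cares (minterm : String) : List String :=
  -- positions = [i for i, char in enumerate(minterm) if char == '-']
  let positions := ((PySem.List.enumerate minterm.toList 0).filter (fun p => p.2 == '-')).map Prod.fst
  -- for values in itertools.product(...): expanded = list(minterm); expanded[pos] = value; "".join
  -- (positions come from enumerate so are ≥ 0; '.toNat' is exact here)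
  (prodA01 positions.length).map (fun values =>
    String.mk (((positions.zip values).foldl (fun l pv => l.set pv.1.toNat pv.2) minterm.toList)))

-- ===== PORT B =====
-- Source B's recursion (a string = its list of characters): i = minterm.find('-');
-- if i == -1 return [minterm]; else head = s[:i], tail = s[i+1:], recurse on tail and
-- prepend head + b for b in "01".  find('-') is List.findIdx? (exact: both give the
-- first index, -1/none when absent); s[:i]/s[i+1:] are take i / drop (i+1).
def expandB (cs : List Char) : List (List Char) :=
  match h : cs.findIdx? (fun c => c == '-') with
  | none => [cs]
  | some i =>
      ['0', '1'].flatMap (fun b =>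
        (expandB (cs.drop (i + 1))).map (fun rest => cs.take i ++ b :: rest))
termination_by cs.length
decreasing_by
  have hi : i < cs.length := (List.findIdx?_eq_some_iff_getElem.mp h).1
  simp only [List.length_drop]
  omega

def expand_dont_cares_alt (minterm : String) : List String :=
  (expandB minterm.toList).map String.mk

-- ===== PRECONDITION & SPEC =====
def Spec_expand_dont_cares (minterm : String) (out : List String) : Prop := out = expand_dont_cares_alt minterm
instance (minterm : String) (out : List String) : Decidable (Spec_expand_dont_cares minterm out) := by unfold Spec_expand_dont_cares; infer_instance

-- ===== CLAIM (what is proved, stated in full; the proofs are below) =====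
def Claim_equal_expand_dont_cares : Prop := ∀ (minterm : String), Dom_expand_dont_cares minterm → Spec_expand_dont_cares minterm (expand_dont_cares minterm)

-- ===== LEMMAS AND PROOFS =====

-- proof-side helper: per-character branching recursion (bridge between the two ports)
def charB : List Char → List (List Char)
  | [] => [[]]
  | c :: cs =>
      (if c == '-' then ['0', '1'] else [c]).flatMap (fun v => (charB cs).map (fun r => v :: r))

def posA (cs : List Char) : List Int :=
  ((PySem.List.enumerate cs 0).filter (fun p => p.2 == '-')).map Prod.fst

def setF (l : List Char) (pv : Int × Char) : List Char := l.set pv.1.toNat pv.2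

lemma enum_shift (xs : List Char) (s : Int) :
    PySem.List.enumerate xs (s + 1) = (PySem.List.enumerate xs s).map (fun p => (p.1 + 1, p.2)) := by
  induction xs generalizing s with
  | nil => simp [PySem.List.enumerate_nil]
  | cons x xs ih => simp [PySem.List.enumerate_cons, ih]

lemma posA_cons (c : Char) (cs : List Char) :
    posA (c :: cs) = (if c == '-' then [(0 : Int)] else []) ++ (posA cs).map (fun p => p + 1) := by
  unfold posA
  rw [PySem.List.enumerate_cons, enum_shift]
  by_cases h : c == '-' <;>
    simp [h, List.filter_map, List.map_map, Function.comp_def]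

lemma posA_nonneg (cs : List Char) : ∀ p ∈ posA cs, 0 ≤ p := by
  induction cs with
  | nil => simp [posA, PySem.List.enumerate_nil]
  | cons c cs ih =>
      intro p hp
      rw [posA_cons] at hp
      rcases List.mem_append.mp hp with h | h
      · by_cases hc : c == '-' <;> simp [hc] at h
        omega
      · obtain ⟨q, hq, rfl⟩ := List.mem_map.mp h
        have := ih q hq; omega

lemma fold_shift (ps : List Int) (vs l : List Char) (c : Char)
    (hps : ∀ p ∈ ps, 0 ≤ p) :
    ((ps.map (fun p => p + 1)).zip vs).foldl setF (c :: l)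
      = c :: ((ps.zip vs).foldl setF l) := by
  induction ps generalizing vs l with
  | nil => simp
  | cons p ps ih =>
      cases vs with
      | nil => simp
      | cons v vs =>
          have hp : 0 ≤ p := hps p (List.mem_cons_self ..)
          have h1 : (p + 1).toNat = p.toNat + 1 := by omega
          simp only [List.map_cons, List.zip_cons_cons, List.foldl_cons]
          rw [show setF (c :: l) (p + 1, v) = c :: setF l (p, v) by simp [setF, h1]]
          exact ih vs (l.set p.toNat v) (fun q hq => hps q (List.mem_cons_of_mem _ hq))

lemma dash_branch (c v : Char) (cs : List Char) :
    ((prodA01 (posA cs).length).map (fun vs => v :: vs)).map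
        (fun vs => ((((0 : Int) :: (posA cs).map (fun p => p + 1)).zip vs)).foldl setF (c :: cs))
      = ((prodA01 (posA cs).length).map (fun vs => ((posA cs).zip vs).foldl setF cs)).map
          (fun r => v :: r) := by
  rw [List.map_map, List.map_map]
  refine List.map_congr_left ?_
  intro vs _
  simp only [Function.comp_apply, List.zip_cons_cons, List.foldl_cons]
  rw [show setF (c :: cs) ((0 : Int), v) = v :: cs by simp [setF]]
  exact fold_shift _ _ _ _ (posA_nonneg cs)

lemma core_eq (cs : List Char) :
    (prodA01 (posA cs).length).map (fun vs => ((posA cs).zip vs).foldl setF cs)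
      = charB cs := by
  induction cs with
  | nil =>
      simp [posA, PySem.List.enumerate_nil, prodA01, charB]
  | cons c cs ih =>
      have hp := posA_cons c cs
      by_cases hc : c == '-'
      · simp only [hc] at hp
        simp only [if_true, List.singleton_append] at hp
        rw [hp]
        have hlen : ((0 : Int) :: (posA cs).map (fun p => p + 1)).length = (posA cs).length + 1 := by
          simp
        rw [hlen,
          show prodA01 ((posA cs).length + 1)
              = ['0', '1'].flatMap (fun v => (prodA01 (posA cs).length).map (fun vs => v :: vs))
            from rfl,
          show charB (c :: cs)
              = ['0', '1'].flatMap (fun v => (charB cs).map (fun r => v :: r)) by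
            simp [charB, hc]]
        simp only [List.flatMap_cons, List.flatMap_nil, List.map_append, List.append_nil]
        rw [dash_branch c '0' cs, dash_branch c '1' cs, ih]
      · simp only [hc] at hp
        simp only [Bool.false_eq_true, if_false, List.nil_append] at hp
        rw [hp, List.length_map,
          show charB (c :: cs) = (charB cs).map (fun r => c :: r) by simp [charB, hc],
          ← ih, List.map_map]
        refine List.map_congr_left ?_
        intro vs _
        simp only [Function.comp_apply]
        exact fold_shift _ _ _ _ (posA_nonneg cs)

lemma charB_no_dash (cs : List Char) (h : ∀ c ∈ cs, (c == '-') = false) :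
    charB cs = [cs] := by
  induction cs with
  | nil => rfl
  | cons c cs ih =>
      have hc := h c (List.mem_cons_self ..)
      simp [charB, hc, ih (fun d hd => h d (List.mem_cons_of_mem _ hd))]

lemma charB_append_no_dash (xs ys : List Char) (h : ∀ c ∈ xs, (c == '-') = false) :
    charB (xs ++ ys) = (charB ys).map (fun r => xs ++ r) := by
  induction xs with
  | nil => simp
  | cons x xs ih =>
      have hx := h x (List.mem_cons_self ..)
      simp only [List.cons_append, charB, hx, Bool.false_eq_true, if_false]
      rw [ih (fun d hd => h d (List.mem_cons_of_mem _ hd))]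
      simp [List.map_map, Function.comp_def]

lemma expandB_eq_charB (cs : List Char) : expandB cs = charB cs := by
  induction hn : cs.length using Nat.strong_induction_on generalizing cs with
  | _ n ih =>
  match h : cs.findIdx? (fun c => c == '-') with
  | none =>
      rw [expandB, h]
      exact (charB_no_dash cs (fun c hc =>
        Bool.not_eq_true _ ▸ (List.findIdx?_eq_none_iff.mp h c hc))).symm
  | some i =>
      obtain ⟨hi, hpi, hlt⟩ := List.findIdx?_eq_some_iff_getElem.mp h
      have hdec : cs = cs.take i ++ cs[i] :: cs.drop (i + 1) := by
        conv_lhs => rw [← List.take_append_drop i cs]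
        rw [List.drop_eq_getElem_cons hi]
      have hdash : cs[i] = '-' := by simpa using hpi
      rw [expandB, h]
      have htail : expandB (cs.drop (i + 1)) = charB (cs.drop (i + 1)) := by
        refine ih (cs.drop (i + 1)).length ?_ _ rfl
        simp only [List.length_drop]; omega
      conv_rhs => rw [hdec, hdash]
      rw [charB_append_no_dash _ _ (fun c hc => by
        obtain ⟨j, hj, rfl⟩ := List.mem_take_iff_getElem.mp hc
        have := hlt j (by omega)
        simpa using this)]
      simp only [charB, if_pos (by rfl : ('-' == '-') = true)]
      rw [htail]
      simp [List.map_map, Function.comp_def]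

-- ===== VERDICT (by name: the statement is the Claim_ definition above) =====
theorem expand_dont_cares_spec : Claim_equal_expand_dont_cares := by
  intro m _
  unfold Spec_expand_dont_cares expand_dont_cares expand_dont_cares_alt
  rw [expandB_eq_charB, ← core_eq m.toList]
  simp only [List.map_map]
  rfl
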